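-- pv_equiv track=rewrite | github.com/ujumom/algorithm | 프로그래머스 LV2/68_영어끝말잇기.py | solution
-- ===== SOURCE A (Python) =====
-- def solution(n, words):
--     answer = [0, 0]
--     check = []
--
--     for i in range(len(words)):
--         # 번호, 차례
--         number = i % n + 1
--         time = i // n + 1
--
--         # 5. 한 글자 단어는 인정 X
--         if len(words[i]) == 1:
--             answer = [number, time]
--             break
--
--         # 4. 이전에 등장했던 단어는 사용 X
--         if words[i] in check:
--             answer = [number, time]
--             break
--
--         # 3. 앞사람이 말한 단어의 마지막 문자로 시작하는 단어 X
--         if check and words[i][0] != check[-1][-1]: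
--             answer = [number, time]
--             break
--
--         check.append(words[i])
--     return answer
-- ===== SOURCE B (Python) =====
-- def _head(w):
--     return w[0] if w else None
--
-- def _last(w):
--     return w[-1] if w else None
--
-- def solution(n, words):
--     # first index whose word has length 1
--     c1 = next((i for i, w in enumerate(words) if len(w) == 1), None)
--     # first index >= 1 whose word does not start with the previous word's last letter
--     c2 = next((i for i in range(1, len(words)) if _head(words[i]) != _last(words[i - 1])), None)
--     # first index whose word already appeared
--     seen = set()
--     c3 = None
--     for i, w in enumerate(words):
--         if w in seen:
--             c3 = i
--             break
--         seen.add(w)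
--     cands = [c for c in (c1, c2, c3) if c is not None]
--     if not cands:
--         return [0, 0]
--     idx = min(cands)
--     return [idx % n + 1, idx // n + 1]
-- ===== Notes on version B (the rewrite author's own statement) =====
-- stated objective: alternative
-- what changed: A is a single stateful early-exit loop carrying a growing 'check' list; B runs three independent scans (first 1-letter word, first chain break via None-safe first/last-letter accessors, first repeated word via a seen-set) and takes the minimum of the candidate indices, converting only the winner to [number, round].
import Mathlib
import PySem

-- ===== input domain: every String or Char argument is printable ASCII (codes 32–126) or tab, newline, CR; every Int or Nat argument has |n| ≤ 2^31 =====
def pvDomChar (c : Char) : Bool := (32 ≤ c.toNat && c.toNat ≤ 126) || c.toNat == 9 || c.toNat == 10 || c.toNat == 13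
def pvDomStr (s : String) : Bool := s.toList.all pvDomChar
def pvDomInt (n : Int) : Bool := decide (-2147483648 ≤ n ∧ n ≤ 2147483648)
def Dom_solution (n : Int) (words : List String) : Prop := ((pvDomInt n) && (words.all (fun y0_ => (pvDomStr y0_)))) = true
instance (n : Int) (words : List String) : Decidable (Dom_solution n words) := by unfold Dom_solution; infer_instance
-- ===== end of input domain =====

-- B is an alternative decomposition: instead of A's single stateful early-exit loop it runs
-- three independent scans (first 1-letter word, first chain break, first repeat) and takes
-- the minimum candidate index; the two return the same value wherever A returns.

-- ===== PORT A =====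
-- the for-loop with early 'break', carrying the loop index and the growing 'check' list
def solutionLoop (n : Int) (words : List String) (i : Nat) (check : List String) : List Int :=
  if h : i < words.length then
    let w := words[i]
    let number := PySem.Int.mod (Int.ofNat i) n + 1
    let time := PySem.Int.floordiv (Int.ofNat i) n + 1
    if PySem.Str.len w = 1 then [number, time]
    else if w ∈ check then [number, time]
    else if check ≠ [] ∧ PySem.Str.pyGet? w 0 ≠ PySem.Str.pyGet? (check.getLastD "") (-1) then
      [number, time]
    else solutionLoop n words (i + 1) (check ++ [w])
  else [0, 0]
termination_by words.length - i

def solution (n : Int) (words : List String) : List Int :=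
  solutionLoop n words 0 []

-- ===== PORT B =====
-- _head(w) = w[0] if w else None  (None-safe first letter)
def headChar (w : String) : Option Char :=
  if w ≠ "" then PySem.Str.pyGet? w 0 else none

-- _last(w) = w[-1] if w else None  (None-safe last letter)
def lastChar (w : String) : Option Char :=
  if w ≠ "" then PySem.Str.pyGet? w (-1) else none

-- c1: first index whose word has length 1
def findLen1 (words : List String) (i : Nat) : Option Nat :=
  if h : i < words.length then
    if PySem.Str.len words[i] = 1 then some i else findLen1 words (i + 1)
  else none
termination_by words.length - i

-- c2: first index ≥ 1 whose word does not start with the previous word's last letter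
def findChain (words : List String) (i : Nat) : Option Nat :=
  if h : i < words.length then
    if headChar words[i] ≠ lastChar (words.getD (i - 1) "") then some i
    else findChain words (i + 1)
  else none
termination_by words.length - i

-- c3: first index whose word is already in the 'seen' set
def findDup (words : List String) (i : Nat) (seen : PySem.Set String) : Option Nat :=
  if h : i < words.length then
    if PySem.Set.contains seen words[i] then some i
    else findDup words (i + 1) (PySem.Set.add seen words[i])
  else none
termination_by words.length - i

def solution_alt (n : Int) (words : List String) : List Int :=
  let c1 := findLen1 words 0
  let c2 := findChain words 1
  let c3 := findDup words 0 PySem.Set.empty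
  let cands := c1.toList ++ c2.toList ++ c3.toList
  match PySem.List.min? cands (fun x => x) with
  | none => [0, 0]
  | some idx => [PySem.Int.mod (Int.ofNat idx) n + 1, PySem.Int.floordiv (Int.ofNat idx) n + 1]

-- ===== PRECONDITION & SPEC =====
-- A's loop advances past index j iff no rule fires there and the two indexings succeed
def proceedsA (words : List String) (j : Nat) : Bool :=
  PySem.Str.len (words.getD j "") != 1 &&
  !(words.take j).contains (words.getD j "") &&
  (j == 0 ||
    (words.getD j "" != "" && words.getD (j - 1) "" != "" &&
     PySem.Str.pyGet? (words.getD j "") 0 == PySem.Str.pyGet? (words.getD (j - 1) "") (-1)))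

-- A raises IndexError at index i: the loop reaches i without breaking, no earlier rule fires
-- at i, i ≥ 1, and words[i] or words[i-1] is the empty string (word[0] / word[-1] fails)
def crashAt (words : List String) (i : Nat) : Bool :=
  (List.range i).all (proceedsA words) &&
  PySem.Str.len (words.getD i "") != 1 &&
  !(words.take i).contains (words.getD i "") &&
  1 ≤ i &&
  (words.getD i "" == "" || words.getD (i - 1) "" == "")

-- Pre_ excludes exactly the inputs where Python A raises: n = 0 with nonempty words
-- (ZeroDivisionError at i % n), and inputs where the loop reaches an empty-string
-- indexing (IndexError); A returns normally on every other input.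
def Pre_solution (n : Int) (words : List String) : Prop :=
  (words = [] ∨ n ≠ 0) ∧ ∀ i < words.length, crashAt words i = false
instance (n : Int) (words : List String) : Decidable (Pre_solution n words) := by
  unfold Pre_solution; infer_instance

def pvWitness_solution : Int × List String := (2, ["tank", "kick", "know"])

def Spec_solution (n : Int) (words : List String) (out : List Int) : Prop := out = solution_alt n words
instance (n : Int) (words : List String) (out : List Int) : Decidable (Spec_solution n words out) := by unfold Spec_solution; infer_instance

-- ===== CLAIM (what is proved, stated in full; the proofs are below) =====
def Claim_equal_solution : Prop := ∀ (n : Int) (words : List String), Dom_solution n words → Pre_solution n words → Spec_solution n words (solution n words)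

-- ===== LEMMAS AND PROOFS =====

theorem headChar_eq (w : String) : headChar w = PySem.Str.pyGet? w 0 := by
  unfold headChar
  by_cases h : w = ""
  · subst h; decide
  · simp [h]

theorem lastChar_eq (w : String) : lastChar w = PySem.Str.pyGet? w (-1) := by
  unfold lastChar
  by_cases h : w = ""
  · subst h; decide
  · simp [h]

-- symmetric minimum of optional candidate indices (proof-side helper)
def omin : Option Nat → Option Nat → Option Nat
  | none, y => y
  | some x, none => some x
  | some x, some y => some (min x y)

-- rendering of the chosen break index (proof-side helper)
def render (n : Int) : Option Nat → List Int
  | none => [0, 0]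
  | some idx => [PySem.Int.mod (Int.ofNat idx) n + 1, PySem.Int.floordiv (Int.ofNat idx) n + 1]

theorem if_min (u v : Nat) : (if v < u then some v else some u) = some (min u v) := by
  split <;> simp <;> omega

theorem min3_eq (a b c : Option Nat) :
    PySem.List.min? (a.toList ++ b.toList ++ c.toList) (fun x => x) = omin a (omin b c) := by
  cases a <;> cases b <;> cases c <;>
    simp only [omin, PySem.List.min?, Option.toList, List.nil_append, List.append_nil,
      List.cons_append, List.foldl, if_min] <;>
    simp [Nat.min_assoc]

theorem findLen1_ge {words : List String} {i j : Nat} (h : findLen1 words i = some j) : i ≤ j := by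
  fun_induction findLen1 words i <;> simp_all <;> omega

theorem findChain_ge {words : List String} {i j : Nat} (h : findChain words i = some j) : i ≤ j := by
  fun_induction findChain words i <;> simp_all <;> omega

theorem findDup_ge {words : List String} {seen : PySem.Set String} {i j : Nat}
    (h : findDup words i seen = some j) : i ≤ j := by
  fun_induction findDup words i seen with
  | case1 => simp_all
  | case2 _ _ _ _ ih => exact le_trans (by omega) (ih h)
  | case3 => simp_all

theorem findLen1_stop {words : List String} {i : Nat}
    (h : ¬ i < words.length) : findLen1 words i = none := by
  unfold findLen1; simp [h]

theorem findChain_stop {words : List String} {i : Nat}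
    (h : ¬ i < words.length) : findChain words i = none := by
  unfold findChain; simp [h]

theorem findDup_stop {words : List String} {seen : PySem.Set String} {i : Nat}
    (h : ¬ i < words.length) : findDup words i seen = none := by
  unfold findDup; simp [h]

theorem omin_hit {a b c : Option Nat} {i : Nat}
    (ha : ∀ j, a = some j → i ≤ j) (hb : ∀ j, b = some j → i ≤ j)
    (hc : ∀ j, c = some j → i ≤ j)
    (hone : a = some i ∨ b = some i ∨ c = some i) :
    omin a (omin b c) = some i := by
  cases a <;> cases b <;> cases c <;> simp_all [omin] <;> omega

theorem take_getLastD {words : List String} {i : Nat} (h1 : 1 ≤ i) (h2 : i ≤ words.length) :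
    (words.take i).getLastD "" = words.getD (i - 1) "" := by
  have hlen : (List.take i words).length = i := by simp; omega
  rw [List.getLastD_eq_getLast?, List.getLast?_eq_getElem?, hlen, List.getD_eq_getElem?_getD,
    List.getElem?_take]
  simp [show i - 1 < i by omega]

theorem take_ne_nil {words : List String} {i : Nat} (h1 : 1 ≤ i) (h2 : i < words.length) :
    words.take i ≠ [] := by
  have hlen : (List.take i words).length = i := by simp; omega
  intro h; rw [h] at hlen; simp at hlen; omega

-- main invariant: from position i with check = words.take i, A's loop returns the rendering of
-- the minimum of B's three remaining candidate scans
theorem loop_eq (n : Int) (words : List String) :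
    ∀ k i, words.length - i ≤ k → i ≤ words.length →
    solutionLoop n words i (words.take i) =
      render n (omin (findLen1 words i)
        (omin (findChain words (max 1 i)) (findDup words i (PySem.Set.ofList (words.take i))))) := by
  intro k
  induction k with
  | zero =>
    intro i hk hi
    have hstop : ¬ i < words.length := by omega
    rw [solutionLoop, findLen1_stop hstop, findDup_stop hstop,
      findChain_stop (i := max 1 i) (by omega)]
    simp [hstop, omin, render]
  | succ k ih =>
    intro i hk hi
    by_cases hlt : i < words.length
    · have hmem : words[i] ∈ words.take i ↔
          PySem.Set.contains (PySem.Set.ofList (words.take i)) words[i] = true := by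
        simp [PySem.Set.contains, PySem.Set.mem_ofList]
      by_cases h1 : PySem.Str.len words[i] = 1
      · -- length-1 word: candidate c1 fires at i
        rw [solutionLoop, dif_pos hlt]
        have hf1 : findLen1 words i = some i := by
          rw [findLen1, dif_pos hlt, if_pos h1]
        rw [omin_hit (fun j hj => findLen1_ge hj)
          (fun j hj => le_trans (le_max_right 1 i) (findChain_ge hj))
          (fun j hj => findDup_ge hj) (Or.inl hf1)]
        rw [if_pos h1]; rfl
      · by_cases h2 : words[i] ∈ words.take i
        · -- repeated word: candidate c3 fires at i
          rw [solutionLoop, dif_pos hlt]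
          have hf3 : findDup words i (PySem.Set.ofList (words.take i)) = some i := by
            rw [findDup, dif_pos hlt, if_pos (hmem.mp h2)]
          rw [omin_hit (fun j hj => findLen1_ge hj)
            (fun j hj => le_trans (le_max_right 1 i) (findChain_ge hj))
            (fun j hj => findDup_ge hj) (Or.inr (Or.inr hf3))]
          rw [if_neg h1, if_pos h2]; rfl
        · by_cases h3 : words.take i ≠ [] ∧
              PySem.Str.pyGet? words[i] 0 ≠ PySem.Str.pyGet? ((words.take i).getLastD "") (-1)
          · -- chain break: candidate c2 fires at i (i ≥ 1 since check ≠ [])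
            have hi1 : 1 ≤ i := by
              by_contra h
              have : i = 0 := by omega
              exact h3.1 (by simp [this])
            rw [solutionLoop, dif_pos hlt]
            have hf2 : findChain words (max 1 i) = some i := by
              have hmx : max 1 i = i := by omega
              rw [hmx, findChain, dif_pos hlt, if_pos]
              rw [headChar_eq, lastChar_eq, ← take_getLastD hi1 (by omega)]
              exact h3.2
            rw [omin_hit (fun j hj => findLen1_ge hj)
              (fun j hj => le_trans (le_max_right 1 i) (findChain_ge hj))
              (fun j hj => findDup_ge hj) (Or.inr (Or.inl hf2))]
            rw [if_neg h1, if_neg h2, if_pos h3]; rfl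
          · -- no rule breaks at i: every scan steps to i + 1
            rw [solutionLoop, dif_pos hlt, if_neg h1, if_neg h2, if_neg h3]
            have htake : words.take i ++ [words[i]] = words.take (i + 1) := by
              rw [List.take_add_one]; simp [hlt]
            have hf1 : findLen1 words i = findLen1 words (i + 1) := by
              rw [findLen1, dif_pos hlt, if_neg h1]
            have hf3 : findDup words i (PySem.Set.ofList (words.take i)) =
                findDup words (i + 1) (PySem.Set.ofList (words.take (i + 1))) := by
              rw [findDup, dif_pos hlt, if_neg (fun hc => h2 (hmem.mpr hc)),
                ← htake, PySem.Set.ofList_append_singleton]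
            have hf2 : findChain words (max 1 i) = findChain words (max 1 (i + 1)) := by
              by_cases hi0 : i = 0
              · subst hi0; rfl
              · have hmx : max 1 i = i := by omega
                have hmx' : max 1 (i + 1) = i + 1 := by omega
                rw [hmx, hmx', findChain, dif_pos hlt, if_neg]
                simp only [headChar_eq, lastChar_eq]
                intro hne
                apply h3
                refine ⟨take_ne_nil (by omega) hlt, ?_⟩
                rw [take_getLastD (by omega) (by omega)]
                exact hne
            rw [htake, hf1, hf2, hf3]
            exact ih (i + 1) (by omega) (by omega)
    · have hstop : ¬ i < words.length := hlt
      rw [solutionLoop, findLen1_stop hstop, findDup_stop hstop,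
        findChain_stop (i := max 1 i) (by omega)]
      simp [hstop, omin, render]

-- ===== VERDICT (by name: the statement is the Claim_ definition above) =====
theorem solution_spec : Claim_equal_solution := by
  intro n words _ _
  unfold Spec_solution solution
  simp only [solution_alt]
  rw [min3_eq]
  have h := loop_eq n words words.length 0 (by omega) (by omega)
  norm_num at h
  rw [h]
  simp only [PySem.Set.empty]
  cases omin (findLen1 words 0) (omin (findChain words 1) (findDup words 0 [])) <;> rfl
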